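-- pv_equiv track=rewrite | github.com/PietroGx/SIMPLICITY | simplicity/phenotype/distance.py | hamming_iw
-- ===== SOURCE A (Python) =====
-- def hamming_iw(lineage,lineage2):
--     # compute the hamming distance of a lineage from consensus sequence
--
--     # Convert sequences into dictionaries
--     dict1 = {position: base for position, base in lineage}
--     dict2 = {position: base for position, base in lineage2}
--
--     # Get the set of all unique positions in either sequence
--     all_positions = set(dict1.keys()) | set(dict2.keys())
--
--     # Initialize distance
--     distance = 0
--
--     # Iterate through all positions and compare bases
--     for position in all_positions:
--         base1 = dict1.get(position)
--         base2 = dict2.get(position)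
--
--         # If bases are different or only one sequence contains the position, increment distance
--         if base1 != base2:
--             distance += 1
--
--     return distance
-- ===== SOURCE B (Python) =====
-- def hamming_iw(lineage, lineage2):
--     # Sort-and-merge reformulation: dedup keeping the last base per position,
--     # sort both by position, then count mismatches with a two-pointer merge.
--     def dedup_sorted(pairs):
--         seen = set()
--         out = []
--         for position, base in reversed(pairs):
--             if position not in seen:
--                 seen.add(position)
--                 out.append((position, base))
--         out.sort(key=lambda t: t[0])
--         return out
--
--     a = dedup_sorted(lineage)
--     b = dedup_sorted(lineage2)
--     i = j = distance = 0
--     while i < len(a) and j < len(b):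
--         if a[i][0] < b[j][0]:
--             distance += 1
--             i += 1
--         elif b[j][0] < a[i][0]:
--             distance += 1
--             j += 1
--         else:
--             if a[i][1] != b[j][1]:
--                 distance += 1
--             i += 1
--             j += 1
--     return distance + (len(a) - i) + (len(b) - j)
-- ===== Notes on version B (the rewrite author's own statement) =====
-- stated objective: alternative
-- what changed: Replaces hashing (two dicts plus one loop over the union of key sets) by last-wins deduplication, sorting both sequences by position and a two-pointer merge that counts mismatches.
import Mathlib
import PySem

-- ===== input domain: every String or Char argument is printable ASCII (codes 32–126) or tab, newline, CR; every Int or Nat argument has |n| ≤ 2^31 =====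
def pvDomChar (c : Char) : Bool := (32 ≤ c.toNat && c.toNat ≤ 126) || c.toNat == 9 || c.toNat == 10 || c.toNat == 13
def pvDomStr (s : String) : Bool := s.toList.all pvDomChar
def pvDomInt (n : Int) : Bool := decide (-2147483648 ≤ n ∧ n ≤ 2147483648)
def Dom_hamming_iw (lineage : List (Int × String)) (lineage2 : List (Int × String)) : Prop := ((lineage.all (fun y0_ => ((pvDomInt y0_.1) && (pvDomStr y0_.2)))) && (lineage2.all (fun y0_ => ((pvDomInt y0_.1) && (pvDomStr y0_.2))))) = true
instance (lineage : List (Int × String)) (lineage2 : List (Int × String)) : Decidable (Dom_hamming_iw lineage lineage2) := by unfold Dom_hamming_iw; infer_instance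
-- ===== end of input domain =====

-- B replaces the dict-hashing union loop by last-wins dedup + sort by position + a two-pointer merge (alternative decomposition; no speed claim).

-- ===== PORT A =====
def hamming_iw (lineage : List (Int × String)) (lineage2 : List (Int × String)) : Int :=
  let dict1 : PySem.Dict Int String := PySem.Dict.ofList lineage
  let dict2 : PySem.Dict Int String := PySem.Dict.ofList lineage2
  let all_positions : PySem.Set Int :=
    PySem.Set.union (PySem.Set.ofList dict1.keys) (PySem.Set.ofList dict2.keys)
  all_positions.foldl
    (fun distance position =>
      if dict1.get? position ≠ dict2.get? position then distance + 1 else distance)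
    (0 : Int)

-- ===== PORT B =====
-- 'for position, base in reversed(pairs): if position not in seen: seen.add; out.append' then 'out.sort(key=lambda t: t[0])'
def pvDedupSort (pairs : List (Int × String)) : List (Int × String) :=
  let st := pairs.reverse.foldl
    (fun (st : PySem.Set Int × List (Int × String)) pb =>
      if PySem.Set.contains st.1 pb.1 then st
      else (PySem.Set.add st.1 pb.1, st.2 ++ [pb]))
    (PySem.Set.empty, [])
  PySem.List.sorted st.2 (fun t => t.1) false

-- the two-pointer while loop, as the obvious structural recursion on the two lists
def pvMerge : List (Int × String) → List (Int × String) → Int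
  | [], b => (b.length : Int)
  | x :: xs, [] => ((x :: xs).length : Int)
  | x :: xs, y :: ys =>
    if x.1 < y.1 then 1 + pvMerge xs (y :: ys)
    else if y.1 < x.1 then 1 + pvMerge (x :: xs) ys
    else (if x.2 ≠ y.2 then 1 else 0) + pvMerge xs ys

def hamming_iw_alt (lineage : List (Int × String)) (lineage2 : List (Int × String)) : Int :=
  pvMerge (pvDedupSort lineage) (pvDedupSort lineage2)

-- ===== PRECONDITION & SPEC =====
def Spec_hamming_iw (lineage : List (Int × String)) (lineage2 : List (Int × String)) (out : Int) : Prop := out = hamming_iw_alt lineage lineage2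
instance (lineage : List (Int × String)) (lineage2 : List (Int × String)) (out : Int) : Decidable (Spec_hamming_iw lineage lineage2 out) := by unfold Spec_hamming_iw; infer_instance

-- ===== CLAIM (what is proved, stated in full; the proofs are below) =====
def Claim_equal_hamming_iw : Prop := ∀ (lineage : List (Int × String)) (lineage2 : List (Int × String)), Dom_hamming_iw lineage lineage2 → Spec_hamming_iw lineage lineage2 (hamming_iw lineage lineage2)

-- ===== LEMMAS AND PROOFS =====

-- first-match association lookup (what find? over pairs computes)
def pvLook (s : List (Int × String)) (x : Int) : Option String :=
  (s.find? (fun p => p.1 == x)).map Prod.snd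

theorem pvLook_nil (x : Int) : pvLook [] x = none := rfl

theorem pvLook_cons (p : Int × String) (s : List (Int × String)) (x : Int) :
    pvLook (p :: s) x = if p.1 = x then some p.2 else pvLook s x := by
  by_cases h : p.1 = x
  · simp [pvLook, h]
  · have hb : (p.1 == x) = false := by simpa using h
    simp [pvLook, hb, h]

theorem pvLook_append (s t : List (Int × String)) (x : Int) :
    pvLook (s ++ t) x = ((pvLook s x).or (pvLook t x)) := by
  simp [pvLook, List.find?_append, Option.map_or]

theorem pvLook_eq_none_iff (s : List (Int × String)) (x : Int) :
    pvLook s x = none ↔ x ∉ s.map Prod.fst := by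
  induction s with
  | nil => simp [pvLook_nil]
  | cons p t ih =>
      rw [pvLook_cons]
      by_cases h : p.1 = x
      · simp [← h]
      · rw [if_neg h, ih]
        simp only [List.map_cons, List.mem_cons, not_or]
        exact ⟨fun hm => ⟨fun hx => h hx.symm, hm⟩, fun hm => hm.2⟩

theorem pvLook_mem_iff (s : List (Int × String)) (hnd : (s.map Prod.fst).Nodup)
    (x : Int) (v : String) : pvLook s x = some v ↔ (x, v) ∈ s := by
  induction s with
  | nil => simp [pvLook_nil]
  | cons p t ih =>
      simp only [List.map_cons, List.nodup_cons] at hnd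
      rw [pvLook_cons]
      by_cases h : p.1 = x
      · rw [if_pos h]
        constructor
        · intro hv
          have hp : p = (x, v) := by
            obtain ⟨p1, p2⟩ := p
            simp_all
          rw [← hp]
          exact List.mem_cons_self ..
        · intro hm
          rcases List.mem_cons.1 hm with h' | hm
          · rw [← h']
          · exfalso
            apply hnd.1
            rw [h]
            exact List.mem_map.2 ⟨(x, v), hm, rfl⟩
      · rw [if_neg h, ih hnd.2]
        constructor
        · exact fun hm => List.mem_cons_of_mem _ hm
        · intro hm
          rcases List.mem_cons.1 hm with h' | hm
          · exact absurd (congrArg Prod.fst (Eq.symm h')) h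
          · exact hm

theorem pvLook_some_of_mem_keys (s : List (Int × String)) (x : Int)
    (h : x ∈ s.map Prod.fst) : pvLook s x ≠ none :=
  fun hn => (pvLook_eq_none_iff s x).1 hn h

-- the pre-sort dedup accumulator, named for the proofs
def pvDedupRaw (l : List (Int × String)) : List (Int × String) :=
  (l.reverse.foldl
    (fun (st : PySem.Set Int × List (Int × String)) pb =>
      if PySem.Set.contains st.1 pb.1 then st
      else (PySem.Set.add st.1 pb.1, st.2 ++ [pb]))
    (PySem.Set.empty, [])).2

theorem pvDedupSort_eq (l : List (Int × String)) :
    pvDedupSort l = PySem.List.sorted (pvDedupRaw l) (fun t => t.1) false := rfl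

-- the dict built by A looks up the LAST occurrence = first match in the reversed list
theorem pv_ofList_get? (l : List (Int × String)) (x : Int) :
    (PySem.Dict.ofList l).get? x = pvLook l.reverse x := by
  induction l using List.reverseRecOn with
  | nil => rfl
  | append_singleton t p ih =>
      have h : PySem.Dict.ofList (t ++ [p]) = (PySem.Dict.ofList t).insert p.1 p.2 := by
        simp [PySem.Dict.ofList, PySem.Dict.update, List.foldl_append]
      rw [h, PySem.Dict.get?_insert, List.reverse_append]
      simp only [List.reverse_singleton, List.singleton_append]
      rw [pvLook_cons, ih]
      by_cases hx : x = p.1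
      · simp [hx]
      · rw [if_neg hx, if_neg (fun h' : p.1 = x => hx (Eq.symm h'))]

-- the dedup loop: result keys are distinct and its first-match lookup is that of out0 ++ r
theorem pv_dedup_invar (r : List (Int × String)) :
    ∀ (s0 : PySem.Set Int) (out0 : List (Int × String)),
      (out0.map Prod.fst).Nodup → (∀ k, k ∈ s0 ↔ k ∈ out0.map Prod.fst) →
      (((r.foldl (fun (st : PySem.Set Int × List (Int × String)) pb =>
          if PySem.Set.contains st.1 pb.1 then st
          else (PySem.Set.add st.1 pb.1, st.2 ++ [pb])) (s0, out0)).2.map Prod.fst).Nodup) ∧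
      (∀ x, pvLook ((r.foldl (fun (st : PySem.Set Int × List (Int × String)) pb =>
          if PySem.Set.contains st.1 pb.1 then st
          else (PySem.Set.add st.1 pb.1, st.2 ++ [pb])) (s0, out0)).2) x
        = pvLook (out0 ++ r) x) := by
  induction r with
  | nil => intro s0 out0 hnd _; simpa using hnd
  | cons p r ih =>
      intro s0 out0 hnd hmem
      simp only [List.foldl_cons]
      by_cases hc : PySem.Set.contains s0 p.1
      · rw [if_pos hc]
        obtain ⟨h1, h2⟩ := ih s0 out0 hnd hmem
        refine ⟨h1, fun x => ?_⟩
        rw [h2 x]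
        have hp : p.1 ∈ out0.map Prod.fst := (hmem p.1).1 ((PySem.Set.contains_iff s0 p.1).1 hc)
        rw [pvLook_append, pvLook_append, pvLook_cons]
        by_cases hx : p.1 = x
        · subst hx
          rcases Option.eq_none_or_eq_some (pvLook out0 p.1) with h | ⟨v, h⟩
          · exact absurd ((pvLook_eq_none_iff out0 p.1).1 h) (by simpa using hp)
          · simp [h]
        · simp [hx]
      · rw [if_neg hc]
        have hp : p.1 ∉ out0.map Prod.fst := fun hm =>
          hc ((PySem.Set.contains_iff s0 p.1).2 ((hmem p.1).2 hm))
        have hnd' : ((out0 ++ [p]).map Prod.fst).Nodup := by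
          simp only [List.map_append, List.map_cons, List.map_nil]
          exact List.Nodup.append hnd (List.nodup_singleton _)
            (by intro a ha hb; simp at hb; subst hb; exact hp ha)
        have hmem' : ∀ k, k ∈ PySem.Set.add s0 p.1 ↔ k ∈ (out0 ++ [p]).map Prod.fst := by
          intro k
          rw [PySem.Set.mem_add]
          simp only [List.map_append, List.map_cons, List.map_nil, List.mem_append,
            List.mem_singleton]
          rw [hmem k]
        obtain ⟨h1, h2⟩ := ih (PySem.Set.add s0 p.1) (out0 ++ [p]) hnd' hmem'
        exact ⟨h1, fun x => by rw [h2 x, List.append_assoc]; rfl⟩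

theorem pvDedupRaw_invar (l : List (Int × String)) :
    ((pvDedupRaw l).map Prod.fst).Nodup ∧
      (∀ x, pvLook (pvDedupRaw l) x = (PySem.Dict.ofList l).get? x) := by
  obtain ⟨h1, h2⟩ := pv_dedup_invar l.reverse PySem.Set.empty []
    (by simp) (by simp [PySem.Set.empty])
  refine ⟨h1, fun x => ?_⟩
  have := h2 x
  rw [pvDedupRaw, this, pv_ofList_get?]
  rfl

theorem pvDedupSort_nodup (l : List (Int × String)) :
    ((pvDedupSort l).map Prod.fst).Nodup := by
  rw [pvDedupSort_eq]
  have hperm := PySem.List.sorted_perm (pvDedupRaw l) (fun t => t.1) false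
  exact ((hperm.map Prod.fst).nodup_iff).2 (pvDedupRaw_invar l).1

theorem pvDedupSort_look (l : List (Int × String)) (x : Int) :
    pvLook (pvDedupSort l) x = (PySem.Dict.ofList l).get? x := by
  have hperm : (pvDedupSort l).Perm (pvDedupRaw l) := by
    rw [pvDedupSort_eq]
    exact PySem.List.sorted_perm (pvDedupRaw l) (fun t => t.1) false
  have hndS : ((pvDedupSort l).map Prod.fst).Nodup := pvDedupSort_nodup l
  obtain ⟨h1, h2⟩ := pvDedupRaw_invar l
  rcases Option.eq_none_or_eq_some (pvLook (pvDedupRaw l) x) with h | ⟨v, h⟩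
  · rw [← h2 x, h]
    rw [pvLook_eq_none_iff] at h ⊢
    intro hm
    exact h (((hperm.map Prod.fst).mem_iff).1 hm)
  · rw [← h2 x, h]
    rw [pvLook_mem_iff _ h1] at h
    exact (pvLook_mem_iff _ hndS x v).2 (hperm.mem_iff.2 h)

theorem pvDedupSort_sorted (l : List (Int × String)) :
    (pvDedupSort l).Pairwise (fun p q => p.1 < q.1) := by
  have hle : (pvDedupSort l).Pairwise (fun p q => p.1 ≤ q.1) := by
    rw [pvDedupSort_eq]
    exact PySem.List.sorted_pairwise (pvDedupRaw l) (fun t => t.1)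
  have hne : (pvDedupSort l).Pairwise (fun p q => p.1 ≠ q.1) := by
    have h := pvDedupSort_nodup l
    rw [List.nodup_iff_pairwise_ne] at h
    exact List.pairwise_map.1 h
  exact (hle.and hne).imp (fun {a b} h => lt_of_le_of_ne h.1 h.2)

-- the two-pointer merge counts the a-pairs whose base differs from b's lookup plus the b-pairs absent from a
theorem pv_merge_count : ∀ (a b : List (Int × String)),
    a.Pairwise (fun p q => p.1 < q.1) → b.Pairwise (fun p q => p.1 < q.1) →
    pvMerge a b = ((a.countP (fun p => decide (pvLook b p.1 ≠ some p.2))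
      + b.countP (fun q => decide (q.1 ∉ a.map Prod.fst)) : Nat) : Int)
  | [], b, _, _ => by
      rw [pvMerge.eq_def]
      simp only [List.countP_nil]
      rw [List.countP_eq_length.2 (by intro q _; simp)]
      simp
  | x :: xs, [], _, _ => by
      rw [pvMerge.eq_def]
      simp only [List.countP_nil]
      rw [List.countP_eq_length.2 (by intro p _; simp [pvLook_nil])]
      simp
  | x :: xs, y :: ys, ha, hb => by
      have hxs := (List.pairwise_cons.1 ha).2
      have hys := (List.pairwise_cons.1 hb).2
      have hxall : ∀ p ∈ xs, x.1 < p.1 := (List.pairwise_cons.1 ha).1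
      have hyall : ∀ p ∈ ys, y.1 < p.1 := (List.pairwise_cons.1 hb).1
      by_cases h1 : x.1 < y.1
      · -- x.1 occurs only in a: it contributes 1 and the merge advances on a
        have hxnb : x.1 ∉ (y :: ys).map Prod.fst := by
          simp only [List.map_cons, List.mem_cons]
          rintro (h | h)
          · omega
          · obtain ⟨p, hp, hpx⟩ := List.mem_map.1 h
            have := hyall p hp; omega
        rw [pvMerge.eq_def]
        simp only [if_pos h1]
        rw [pv_merge_count xs (y :: ys) hxs hb]
        have e1 : (x :: xs).countP (fun p => decide (pvLook (y :: ys) p.1 ≠ some p.2))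
            = xs.countP (fun p => decide (pvLook (y :: ys) p.1 ≠ some p.2)) + 1 := by
          rw [List.countP_cons]
          have hn : pvLook (y :: ys) x.1 = none := (pvLook_eq_none_iff _ _).2 hxnb
          simp [hn]
        have e2 : (y :: ys).countP (fun q => decide (q.1 ∉ (x :: xs).map Prod.fst))
            = (y :: ys).countP (fun q => decide (q.1 ∉ xs.map Prod.fst)) := by
          apply List.countP_congr
          intro q hq
          have hne : q.1 ≠ x.1 := by
            rcases List.mem_cons.1 hq with h | h
            · rw [h]; omega
            · have := hyall q h; omega
          simp only [List.map_cons, List.mem_cons, decide_eq_true_iff, not_or]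
          constructor
          · exact fun h => h.2
          · exact fun h => ⟨hne, h⟩
        rw [e1, e2]
        push_cast
        ring
      · by_cases h2 : y.1 < x.1
        · -- y.1 occurs only in b: it contributes 1 and the merge advances on b
          have hyna : y.1 ∉ (x :: xs).map Prod.fst := by
            simp only [List.map_cons, List.mem_cons]
            rintro (h | h)
            · omega
            · obtain ⟨p, hp, hpx⟩ := List.mem_map.1 h
              have := hxall p hp; omega
          rw [pvMerge.eq_def]
          simp only [if_neg h1, if_pos h2]
          rw [pv_merge_count (x :: xs) ys ha hys]
          have e1 : (x :: xs).countP (fun p => decide (pvLook (y :: ys) p.1 ≠ some p.2))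
              = (x :: xs).countP (fun p => decide (pvLook ys p.1 ≠ some p.2)) := by
            apply List.countP_congr
            intro p hp
            have hne : p.1 ≠ y.1 := by
              rcases List.mem_cons.1 hp with h | h
              · rw [h]; omega
              · have := hxall p h; omega
            rw [pvLook_cons, if_neg (fun h => hne (Eq.symm h))]
          have e2 : (y :: ys).countP (fun q => decide (q.1 ∉ (x :: xs).map Prod.fst))
              = ys.countP (fun q => decide (q.1 ∉ (x :: xs).map Prod.fst)) + 1 := by
            rw [List.countP_cons]
            have hd : (decide (y.1 ∉ (x :: xs).map Prod.fst)) = true := decide_eq_true hyna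
            rw [hd]
            simp
          rw [e1, e2]
          push_cast
          ring
        · -- equal positions: compare bases, advance both
          have hxy : x.1 = y.1 := by omega
          rw [pvMerge.eq_def]
          simp only [if_neg h1, if_neg h2]
          rw [pv_merge_count xs ys hxs hys]
          have e1 : (x :: xs).countP (fun p => decide (pvLook (y :: ys) p.1 ≠ some p.2))
              = xs.countP (fun p => decide (pvLook ys p.1 ≠ some p.2))
                + (if x.2 ≠ y.2 then 1 else 0) := by
            rw [List.countP_cons]
            have hhead : pvLook (y :: ys) x.1 = some y.2 := by
              rw [pvLook_cons, if_pos (Eq.symm hxy)]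
            have htail : xs.countP (fun p => decide (pvLook (y :: ys) p.1 ≠ some p.2))
                = xs.countP (fun p => decide (pvLook ys p.1 ≠ some p.2)) := by
              apply List.countP_congr
              intro p hp
              have hne : p.1 ≠ y.1 := by
                have := hxall p hp; omega
              rw [pvLook_cons, if_neg (fun h => hne (Eq.symm h))]
            rw [htail, hhead]
            by_cases hv : x.2 = y.2
            · simp [hv]
            · have hv' : ¬y.2 = x.2 := fun h => hv (Eq.symm h)
              simp [hv, hv']
          have e2 : (y :: ys).countP (fun q => decide (q.1 ∉ (x :: xs).map Prod.fst))
              = ys.countP (fun q => decide (q.1 ∉ xs.map Prod.fst)) := by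
            rw [List.countP_cons]
            have hy1 : y.1 ∈ (x :: xs).map Prod.fst := by
              simp [← hxy]
            have htail : ys.countP (fun q => decide (q.1 ∉ (x :: xs).map Prod.fst))
                = ys.countP (fun q => decide (q.1 ∉ xs.map Prod.fst)) := by
              apply List.countP_congr
              intro q hq
              have hne : q.1 ≠ x.1 := by
                have := hyall q hq; omega
              simp only [List.map_cons, List.mem_cons, decide_eq_true_iff, not_or]
              constructor
              · exact fun h => h.2
              · exact fun h => ⟨hne, h⟩
            rw [htail]
            have hd : (decide (y.1 ∉ (x :: xs).map Prod.fst)) = false :=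
              decide_eq_false (not_not_intro hy1)
            rw [hd]
            simp
          rw [e1, e2]
          push_cast
          by_cases hv : x.2 = y.2
          · simp [hv]
          · simp [hv]
            ring

-- keys of the deduped list are exactly the dict's keys
theorem pvDedupSort_mem_keys (l : List (Int × String)) (x : Int) :
    x ∈ (pvDedupSort l).map Prod.fst ↔ x ∈ (PySem.Dict.ofList l).keys := by
  constructor
  · intro h
    by_contra hn
    exact pvLook_some_of_mem_keys _ x h
      (by rw [pvDedupSort_look]; exact (PySem.Dict.get?_eq_none_iff_not_mem_keys _ _).2 hn)
  · intro h
    by_contra hn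
    have := (pvLook_eq_none_iff _ x).2 hn
    rw [pvDedupSort_look] at this
    exact (PySem.Dict.get?_eq_none_iff_not_mem_keys _ _).1 this h

-- ===== VERDICT (by name: the statement is the Claim_ definition above) =====
theorem hamming_iw_spec : Claim_equal_hamming_iw := by
  intro l1 l2 _
  unfold Spec_hamming_iw hamming_iw hamming_iw_alt
  simp only []
  rw [PySem.List.foldl_ite_add_one
    (p := fun x => (PySem.Dict.ofList l1).get? x ≠ (PySem.Dict.ofList l2).get? x)]
  rw [pv_merge_count _ _ (pvDedupSort_sorted l1) (pvDedupSort_sorted l2)]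
  have hMnd : ((pvDedupSort l1).map Prod.fst ++ ((pvDedupSort l2).map Prod.fst).filter
      (fun k => decide (k ∉ (pvDedupSort l1).map Prod.fst))).Nodup := by
    refine List.Nodup.append (pvDedupSort_nodup l1)
      ((pvDedupSort_nodup l2).filter _) ?_
    intro k hk hkf
    have h := List.of_mem_filter hkf
    simp only [decide_eq_true_iff] at h
    exact h hk
  have hUnd : (PySem.Set.union (PySem.Set.ofList (PySem.Dict.ofList l1).keys)
      (PySem.Set.ofList (PySem.Dict.ofList l2).keys)).Nodup :=
    PySem.Set.nodup_union _ _ (PySem.Set.nodup_ofList _)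
  have hperm : (PySem.Set.union (PySem.Set.ofList (PySem.Dict.ofList l1).keys)
      (PySem.Set.ofList (PySem.Dict.ofList l2).keys)).Perm
      ((pvDedupSort l1).map Prod.fst ++ ((pvDedupSort l2).map Prod.fst).filter
        (fun k => decide (k ∉ (pvDedupSort l1).map Prod.fst))) := by
    rw [List.perm_ext_iff_of_nodup hUnd hMnd]
    intro k
    rw [PySem.Set.mem_union, PySem.Set.mem_ofList, PySem.Set.mem_ofList]
    simp only [List.mem_append, List.mem_filter, decide_eq_true_iff]
    rw [← pvDedupSort_mem_keys, ← pvDedupSort_mem_keys]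
    by_cases h : k ∈ (pvDedupSort l1).map Prod.fst
    · simp [h]
    · simp [h]
  rw [hperm.countP_eq, List.countP_append]
  have e1 : List.countP (fun k => decide ((PySem.Dict.ofList l1).get? k ≠ (PySem.Dict.ofList l2).get? k))
      ((pvDedupSort l1).map Prod.fst)
      = (pvDedupSort l1).countP (fun p => decide (pvLook (pvDedupSort l2) p.1 ≠ some p.2)) := by
    rw [List.countP_map]
    apply List.countP_congr
    intro p hp
    have h1 : (PySem.Dict.ofList l1).get? p.1 = some p.2 := by
      rw [← pvDedupSort_look]
      exact (pvLook_mem_iff _ (pvDedupSort_nodup l1) p.1 p.2).2 (by rw [Prod.mk.eta]; exact hp)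
    simp only [Function.comp, decide_eq_true_iff]
    rw [h1, pvDedupSort_look]
    exact ne_comm
  have e2 : List.countP (fun k => decide ((PySem.Dict.ofList l1).get? k ≠ (PySem.Dict.ofList l2).get? k))
      (((pvDedupSort l2).map Prod.fst).filter
        (fun k => decide (k ∉ (pvDedupSort l1).map Prod.fst)))
      = (pvDedupSort l2).countP (fun q => decide (q.1 ∉ (pvDedupSort l1).map Prod.fst)) := by
    rw [List.countP_filter, List.countP_map]
    apply List.countP_congr
    intro q hq
    simp only [Function.comp, Bool.and_eq_true, decide_eq_true_iff]
    constructor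
    · exact fun h => h.2
    · intro h
      refine ⟨?_, h⟩
      have hn : (PySem.Dict.ofList l1).get? q.1 = none := by
        rw [← pvDedupSort_look]
        exact (pvLook_eq_none_iff _ _).2 h
      have hs : (PySem.Dict.ofList l2).get? q.1 = some q.2 := by
        rw [← pvDedupSort_look]
        exact (pvLook_mem_iff _ (pvDedupSort_nodup l2) q.1 q.2).2 (by rw [Prod.mk.eta]; exact hq)
      rw [hn, hs]
      simp
  rw [e1, e2]
  push_cast
  ring
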